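-- pv_equiv track=rewrite | github.com/JeonDaehong/dingcorithm | 1st_week/01_08_summarize_string.py | summarize_string
-- ===== SOURCE A (Python) =====
-- def summarize_string(input_str):
--     alphabet_map = dict()
--
--     if len(input_str) == 0:
--         return ""
--
--     return_string = ""
--     for char in input_str:
--         if char.isalpha():
--             alphabet_map.setdefault(char, 0)
--             alphabet_map[char] += 1
--
--     for char, count in alphabet_map.items():
--         return_string += str(char) + str(count) + "/"
--
--     return return_string[:-1]
-- ===== SOURCE B (Python) =====
-- def summarize_string(input_str):
--     def go(chars):
--         if not chars:
--             return []
--         c = chars[0]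
--         rest = [x for x in chars if x != c]
--         return [c + str(len(chars) - len(rest))] + go(rest)
--     return "/".join(go([c for c in input_str if c.isalpha()]))
-- ===== Notes on version B (the rewrite author's own statement) =====
-- stated objective: alternative
-- what changed: Replaced A's single-pass dict(setdefault/increment) counting plus separator-terminated concatenation-and-trim by a partition recursion with no counting table: take the first remaining alphabetic character, obtain its count as the length drop after list-comprehension removal of all its occurrences, recurse on the remainder, and join the parts with the separator.
import Mathlib
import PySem

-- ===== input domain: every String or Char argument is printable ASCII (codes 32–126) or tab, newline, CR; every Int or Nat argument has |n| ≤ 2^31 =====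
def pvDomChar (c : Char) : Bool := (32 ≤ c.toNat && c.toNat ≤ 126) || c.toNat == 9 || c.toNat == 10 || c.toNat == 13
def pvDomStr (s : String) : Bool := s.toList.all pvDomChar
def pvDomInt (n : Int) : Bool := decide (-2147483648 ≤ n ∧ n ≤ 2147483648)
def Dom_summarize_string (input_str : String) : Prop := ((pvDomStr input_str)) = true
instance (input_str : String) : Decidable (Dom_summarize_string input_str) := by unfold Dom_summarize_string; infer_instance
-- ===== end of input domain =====

-- B replaces A's dict-counting loop and trailing-slash trim by a partition recursion with no
-- counting table (count = length drop after removing the head char, recurse on the remainder).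

-- ===== PORT A =====
-- the loop body: if char.isalpha(): alphabet_map.setdefault(char, 0); alphabet_map[char] += 1
def pvAStep (d : PySem.Dict Char Int) (c : Char) : PySem.Dict Char Int :=
  if PySem.Chars.isalpha c then
    let d1 := d.setdefault c 0
    d1.insert c (d1.getD c 0 + 1)
  else d

-- return_string is built over List Char (Lean's String.append is opaque); [:-1] is PySem.List.slice
def summarize_string (input_str : String) : String :=
  if PySem.Str.len input_str = 0 then ""
  else
    let m := input_str.toList.foldl pvAStep PySem.Dict.empty
    let ret := m.items.foldl
      (fun (s : List Char) (p : Char × Int) => s ++ [p.1] ++ PySem.Int.toChars p.2 ++ ['/']) []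
    String.ofList (PySem.List.slice ret none (some (-1)))

-- ===== PORT B =====
-- go(chars): if not chars: []; c = chars[0]; rest = [x for x in chars if x != c];
--            [c + str(len(chars) - len(rest))] + go(rest)
def pvGo : List Char → List (List Char)
  | [] => []
  | c :: t =>
    let rest := (c :: t).filter (fun x => !(x == c))
    ([c] ++ PySem.Int.toChars (((c :: t).length : Int) - (rest.length : Int))) :: pvGo rest
termination_by l => l.length
decreasing_by
  have h : ((c :: t).filter (fun x => !(x == c))).length ≤ t.length := by
    simp only [List.filter_cons, beq_self_eq_true, Bool.not_true, Bool.false_eq_true,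
      if_false]
    exact List.length_filter_le _ _
  simpa using Nat.lt_succ_of_le h

-- "/".join(go([c for c in input_str if c.isalpha()]))
def summarize_string_alt (input_str : String) : String :=
  String.ofList (PySem.Chars.join ['/'] (pvGo (input_str.toList.filter PySem.Chars.isalpha)))

-- ===== PRECONDITION & SPEC =====
def Spec_summarize_string (input_str : String) (out : String) : Prop := out = summarize_string_alt input_str
instance (input_str : String) (out : String) : Decidable (Spec_summarize_string input_str out) := by unfold Spec_summarize_string; infer_instance

-- ===== CLAIM (what is proved, stated in full; the proofs are below) =====
def Claim_equal_summarize_string : Prop := ∀ (input_str : String), Dom_summarize_string input_str → Spec_summarize_string input_str (summarize_string input_str)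

-- ===== LEMMAS AND PROOFS =====

-- A's setdefault-then-increment step is the plain counter-insert step
theorem pvAStep_eq (d : PySem.Dict Char Int) (c : Char) :
    pvAStep d c = if PySem.Chars.isalpha c then d.insert c (d.getD c 0 + 1) else d := by
  unfold pvAStep
  split
  · by_cases h : d.contains c
    · rw [PySem.Dict.setdefault_of_contains _ _ h]
    · rw [PySem.Dict.setdefault_of_not_contains _ _ (Bool.not_eq_true _ ▸ h)]
      show (d.insert c 0).insert c ((d.insert c 0).getD c 0 + 1) = d.insert c (d.getD c 0 + 1)
      rw [PySem.Dict.getD_insert_self, PySem.Dict.insert_insert_self,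
        PySem.Dict.getD_of_not_contains d 0 (Bool.not_eq_true _ ▸ h)]
  · rfl

-- A's guarded fold over all chars = the counter fold over the alpha-filtered chars
theorem pvFoldA_eq_filter (l : List Char) (d : PySem.Dict Char Int) :
    l.foldl pvAStep d
      = (l.filter PySem.Chars.isalpha).foldl (fun d c => d.insert c (d.getD c 0 + 1)) d := by
  induction l generalizing d with
  | nil => rfl
  | cons c l ih =>
    simp only [List.foldl_cons, List.filter_cons, pvAStep_eq]
    by_cases h : PySem.Chars.isalpha c
    · simp [h, ih]
    · simp [h, ih]

-- the concatenation fold is append of the flattened '/'-terminated parts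
theorem pvFoldCat_eq (parts : List (List Char)) (acc : List Char) :
    parts.foldl (fun s p => s ++ p ++ ['/']) acc
      = acc ++ (parts.map (· ++ ['/'])).flatten := by
  induction parts generalizing acc with
  | nil => simp
  | cons p ps ih => simp [List.append_assoc]

-- dropping the trailing '/' from the concatenation is exactly "/".join
theorem pvDropLast_eq_join (parts : List (List Char)) :
    ((parts.map (· ++ ['/'])).flatten).dropLast = PySem.Chars.join ['/'] parts := by
  induction parts with
  | nil => simp [PySem.Chars.join_nil]
  | cons p ps ih =>
    cases ps with
    | nil => simp [PySem.Chars.join_singleton]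
    | cons q qs =>
      have hne : ((((q :: qs)).map (· ++ ['/'])).flatten) ≠ [] := by simp
      rw [PySem.Chars.join_cons_cons, List.map_cons, List.flatten_cons,
        List.dropLast_append_of_ne_nil hne, ih]

-- set(xs) commutes with filtering the source list
theorem pvOfList_filter (p : Char → Bool) (l : List Char) :
    PySem.Set.ofList (l.filter p) = (PySem.Set.ofList l).filter p := by
  induction l with
  | nil => rfl
  | cons x t ih =>
    by_cases hx : p x
    · rw [List.filter_cons_of_pos hx, PySem.Set.ofList_cons, PySem.Set.ofList_cons]
      show x :: (PySem.Set.ofList (t.filter p)).filter (fun y => !(y == x))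
          = (x :: (PySem.Set.ofList t).filter (fun y => !(y == x))).filter p
      rw [List.filter_cons_of_pos hx, ih, List.filter_filter, List.filter_filter]
      congr 1
      exact List.filter_congr (fun a _ => by rw [Bool.and_comm])
    · rw [List.filter_cons_of_neg hx, PySem.Set.ofList_cons]
      show PySem.Set.ofList (t.filter p)
          = (x :: (PySem.Set.ofList t).filter (fun y => !(y == x))).filter p
      rw [List.filter_cons_of_neg hx, ih, List.filter_filter]
      exact List.filter_congr (fun a _ => by
        by_cases hax : a = x
        · subst hax; simp [hx]
        · simp [hax])

-- the partition recursion computes exactly the first-occurrence-ordered counts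
theorem pvGo_eq (l : List Char) :
    pvGo l = (PySem.Set.ofList l).map
      (fun c => [c] ++ PySem.Int.toChars ((l.count c : Int))) := by
  induction l using pvGo.induct with
  | case1 => simp [pvGo]
  | case2 c t rest ih =>
    have hrest : rest = t.filter (fun x => !(x == c)) := by
      show (c :: t).filter (fun x => !(x == c)) = _
      simp
    rw [pvGo, PySem.Set.ofList_cons, List.map_cons]
    show _ :: pvGo rest = _
    rw [ih]
    congr 1
    · -- head: length drop is the count of c
      have hsplit : (t.filter (fun x => !(x == c))).length + t.count c = t.length := by
        rw [← List.countP_eq_length_filter, List.count_eq_countP,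
          List.length_eq_countP_add_countP (fun x => x == c) (l := t), Nat.add_comm]
        congr 1
        exact List.countP_congr (fun a _ => by by_cases h : a = c <;> simp [h])
      have hlen : rest.length + (c :: t).count c = (c :: t).length := by
        rw [hrest, List.count_cons_self, List.length_cons]
        omega
      congr 1
      congr 1
      push_cast [← hlen]
      ring
    · -- tail: counts in rest agree with counts in c :: t on its members
      have hset : PySem.Set.ofList rest = (PySem.Set.ofList t).discard c := by
        rw [hrest, pvOfList_filter]; rfl
      rw [hset]
      apply List.map_congr_left
      intro a ha
      have hac : ¬ (a = c) := by
        exact ((PySem.Set.mem_discard (PySem.Set.ofList t) c a).mp ha).2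
      have hcount : rest.count a = (c :: t).count a := by
        rw [hrest, List.count_filter (by simp [hac]),
          List.count_cons_of_ne (fun h => hac h.symm)]
      rw [hcount]

theorem pvBody_eq (input_str : String) :
    String.ofList
      (PySem.List.slice
        ((input_str.toList.foldl pvAStep PySem.Dict.empty).items.foldl
          (fun (s : List Char) (p : Char × Int) => s ++ [p.1] ++ PySem.Int.toChars p.2 ++ ['/']) [])
        none (some (-1)))
      = summarize_string_alt input_str := by
  rw [pvFoldA_eq_filter, PySem.Dict.foldl_insert_getD_add_one_eq_counter,
    PySem.List.slice_to_neg_one]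
  have h := pvFoldCat_eq ((PySem.Dict.counter (input_str.toList.filter PySem.Chars.isalpha)).items.map
      (fun p : Char × Int => [p.1] ++ PySem.Int.toChars p.2)) []
  rw [List.foldl_map] at h
  simp only [List.append_assoc] at h ⊢
  rw [h, List.nil_append, pvDropLast_eq_join, PySem.Dict.items_counter, List.map_map]
  unfold summarize_string_alt
  rw [pvGo_eq]
  rfl

-- ===== VERDICT (by name: the statement is the Claim_ definition above) =====
theorem summarize_string_spec : Claim_equal_summarize_string := by
  intro input_str _
  unfold Spec_summarize_string summarize_string
  by_cases h : PySem.Str.len input_str = 0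
  · have hl : input_str.toList = [] := by
      have := h
      simp [PySem.Str.len] at this
      simpa using this
    simp only [h, if_pos]
    unfold summarize_string_alt
    rw [hl]
    simp only [List.filter_nil, pvGo, PySem.Chars.join_nil]
  · simp only [h, ite_false]
    exact pvBody_eq input_str
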